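-- pv_equiv track=rewrite | github.com/ShivamB25/komga-cover-extractor | utils/helpers.py | abbreviate_numbers
-- ===== SOURCE A (Python) =====
-- def abbreviate_numbers(numbers):
--     result = []
--     temp_range = []
--
--     for i in range(len(numbers)):
--         # Check if the current number is an integer and if it's part of a sequential range
--         if i == 0 or (
--             isinstance(numbers[i], int)
--             and isinstance(numbers[i - 1], int)
--             and numbers[i] == numbers[i - 1] + 1
--         ):
--             temp_range.append(numbers[i])
--         else:
--             # Handle ranges and individual numbers
--             if len(temp_range) > 1:
--                 result.append(f"{temp_range}-{temp_range[-1]}")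
--             else:
--                 result.extend(map(str, temp_range))
--             temp_range = [numbers[i]]
--
--     # Handle the last part
--     if len(temp_range) > 1:
--         result.append(f"{temp_range}-{temp_range[-1]}")
--     else:
--         result.extend(map(str, temp_range))
--
--     return ", ".join(result)
-- ===== SOURCE B (Python) =====
-- def abbreviate_numbers(numbers):
--     # Different characterization: a maximal consecutive run is exactly a maximal
--     # block on which x - index is constant.  Compute that key list, find the
--     # block boundaries where the key changes, and format each slice.
--     n = len(numbers)
--     keys = [x - i for i, x in enumerate(numbers)]
--     bounds = [i for i in range(n) if i == 0 or keys[i] != keys[i - 1]] + [n]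
--     pieces = []
--     for a, b in zip(bounds, bounds[1:]):
--         g = numbers[a:b]
--         pieces.append(f"{g}-{g[-1]}" if b - a > 1 else str(g[0]))
--     return ", ".join(pieces)
-- ===== Notes on version B (the rewrite author's own statement) =====
-- stated objective: alternative
-- what changed: B replaces A's buffering loop (grow temp_range, flush on break) with a different characterization of the runs: x - index is constant exactly on maximal consecutive runs, so B computes that key list, collects the boundary indices where the key changes, and formats each slice numbers[a:b] between adjacent boundaries; the whole-list f-string rendering of a multi-element run is the function's output format and is kept.
import Mathlib
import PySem

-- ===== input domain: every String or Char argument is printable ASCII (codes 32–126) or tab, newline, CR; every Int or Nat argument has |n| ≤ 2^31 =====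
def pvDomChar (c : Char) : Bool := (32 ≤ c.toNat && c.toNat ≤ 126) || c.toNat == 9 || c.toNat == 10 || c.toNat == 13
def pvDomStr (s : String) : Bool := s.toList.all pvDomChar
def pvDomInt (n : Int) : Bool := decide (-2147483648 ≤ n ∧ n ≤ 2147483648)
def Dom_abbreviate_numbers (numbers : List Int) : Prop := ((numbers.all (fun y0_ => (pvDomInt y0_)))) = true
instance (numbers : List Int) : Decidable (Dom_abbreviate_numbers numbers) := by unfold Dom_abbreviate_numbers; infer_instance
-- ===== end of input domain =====

-- B re-derives the ranges from a different characterization — x - index is constant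
-- exactly on maximal consecutive runs — via staged passes (key list, boundary list,
-- slice extraction) instead of A's buffering loop; same output, alternative algorithm.


-- ===== PORT A =====
-- Python's f"{g}" rendering of a list of ints: "[a, b, c]" (exact for ints)
def pvReprList (g : List Int) : String :=
  "[" ++ PySem.Str.join ", " (g.map PySem.Int.toStr) ++ "]"

-- A's duplicated flush block: format temp_range into result
def pvFlushA (result : List String) (temp : List Int) : List String :=
  if 1 < temp.length then
    result ++ [pvReprList temp ++ "-" ++ PySem.Int.toStr (PySem.List.pyGetD temp (-1) 0)]
  else
    result ++ temp.map PySem.Int.toStr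

-- A's loop body (i ranges over range(len(numbers))); the isinstance(_, int)
-- checks are always True since the elements are Int
def pvStepA (numbers : List Int) (st : List String × List Int) (i : Int) : List String × List Int :=
  if i = 0 ∨ PySem.List.pyGetD numbers i 0 = PySem.List.pyGetD numbers (i - 1) 0 + 1 then
    (st.1, st.2 ++ [PySem.List.pyGetD numbers i 0])
  else
    (pvFlushA st.1 st.2, [PySem.List.pyGetD numbers i 0])

def abbreviate_numbers (numbers : List Int) : String :=
  let st := (PySem.List.pyRange 0 numbers.length 1).foldl (pvStepA numbers) ([], [])
  PySem.Str.join ", " (pvFlushA st.1 st.2)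

-- ===== PORT B =====
-- keys = [x - i for i, x in enumerate(numbers)]
def pvKeys (numbers : List Int) : List Int :=
  (PySem.List.enumerate numbers).map (fun p => p.2 - p.1)

-- the boundary test: i == 0 or keys[i] != keys[i-1]
def pvBrk (numbers : List Int) (i : Int) : Bool :=
  i == 0 || !(PySem.List.pyGet? (pvKeys numbers) i == PySem.List.pyGet? (pvKeys numbers) (i - 1))

-- bounds = [i for i in range(n) if i == 0 or keys[i] != keys[i-1]] + [n]
def pvStarts (numbers : List Int) : List Int :=
  (PySem.List.pyRange 0 (numbers.length : Int) 1).filter (pvBrk numbers)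

def pvBounds (numbers : List Int) : List Int :=
  pvStarts numbers ++ [(numbers.length : Int)]

-- body of the formatting loop, for one (a, b) pair
def pvPieceAt (numbers : List Int) (p : Int × Int) : String :=
  let g := PySem.List.slice numbers (some p.1) (some p.2)
  if 1 < p.2 - p.1 then pvReprList g ++ "-" ++ PySem.Int.toStr (PySem.List.pyGetD g (-1) 0)
  else PySem.Int.toStr (PySem.List.pyGetD g 0 0)

-- for a, b in zip(bounds, bounds[1:]): pieces.append(...)
def pvPieces (numbers : List Int) : List String :=
  ((pvBounds numbers).zip ((pvBounds numbers).drop 1)).foldl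
    (fun acc p => acc ++ [pvPieceAt numbers p]) []

def abbreviate_numbers_alt (numbers : List Int) : String :=
  PySem.Str.join ", " (pvPieces numbers)

-- ===== PRECONDITION & SPEC =====
def Spec_abbreviate_numbers (numbers : List Int) (out : String) : Prop := out = abbreviate_numbers_alt numbers
instance (numbers : List Int) (out : String) : Decidable (Spec_abbreviate_numbers numbers out) := by unfold Spec_abbreviate_numbers; infer_instance

-- ===== CLAIM (what is proved, stated in full; the proofs are below) =====
def Claim_equal_abbreviate_numbers : Prop := ∀ (numbers : List Int), Dom_abbreviate_numbers numbers → Spec_abbreviate_numbers numbers (abbreviate_numbers numbers)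

-- ===== LEMMAS AND PROOFS =====

-- the common description both programs are reduced to: split into maximal runs
def pvSplit : Int → List Int → List Int × List Int
  | _, [] => ([], [])
  | p, y :: ys => if y = p + 1 then (y :: (pvSplit y ys).1, (pvSplit y ys).2) else ([], y :: ys)

theorem pvSplit_snd_length (p : Int) (ys : List Int) : (pvSplit p ys).2.length ≤ ys.length := by
  induction ys generalizing p with
  | nil => simp [pvSplit]
  | cons y ys ih =>
    simp only [pvSplit]
    split
    · exact le_trans (ih y) (Nat.le_succ _)
    · simp

def pvRuns : List Int → List (List Int)
  | [] => []
  | x :: ys => (x :: (pvSplit x ys).1) :: pvRuns (pvSplit x ys).2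
termination_by l => l.length
decreasing_by
  have := pvSplit_snd_length x ys
  simp
  omega

-- the per-run formatter both reductions target
def pvPieceB (g : List Int) : String :=
  if 1 < g.length then pvReprList g ++ "-" ++ PySem.Int.toStr (PySem.List.pyGetD g (-1) 0)
  else PySem.Int.toStr (PySem.List.pyGetD g 0 0)

theorem pvFlushA_eq_piece (res : List String) (g : List Int) (h : g ≠ []) :
    pvFlushA res g = res ++ [pvPieceB g] := by
  match g, h with
  | [a], _ => simp [pvFlushA, pvPieceB, PySem.List.pyGetD_zero]
  | a :: b :: gs, _ => simp [pvFlushA, pvPieceB]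

-- A's loop, started mid-list with open run cur, produces the runs of cur ++ tail
theorem pv_loop_eq (numbers : List Int) :
    ∀ (tail : List Int) (j : Nat) (done : List String) (cur : List Int),
      cur ≠ [] → numbers.drop j = tail → 1 ≤ j →
      PySem.List.pyGetD numbers ((j : Int) - 1) 0 = PySem.List.pyGetD cur (-1) 0 →
      (let st := (PySem.List.pyRange (j : Int) (numbers.length : Int) 1).foldl (pvStepA numbers) (done, cur)
       pvFlushA st.1 st.2)
      = done ++ ((cur ++ (pvSplit (PySem.List.pyGetD cur (-1) 0) tail).1)
                  :: pvRuns (pvSplit (PySem.List.pyGetD cur (-1) 0) tail).2).map pvPieceB := by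
  intro tail
  induction tail with
  | nil =>
    intro j done cur hcur hdrop hj hinv
    have hlen : numbers.length ≤ j := List.drop_eq_nil_iff.mp hdrop
    rw [PySem.List.pyRange_one_eq_nil (by exact_mod_cast hlen)]
    simp [List.foldl, pvFlushA_eq_piece _ _ hcur, pvSplit, pvRuns]
  | cons y tail' ih =>
    intro j done cur hcur hdrop hj hinv
    have hjlt : j < numbers.length := by
      rcases Nat.lt_or_ge j numbers.length with h | h
      · exact h
      · rw [List.drop_eq_nil_iff.mpr h] at hdrop
        simp at hdrop
    have hgetj : numbers[j]? = some y := by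
      have : (numbers.drop j)[0]? = some y := by rw [hdrop]; rfl
      simpa using this
    have hyj : PySem.List.pyGetD numbers (j : Int) 0 = y := by
      rw [PySem.List.pyGetD_natCast]
      simp [List.getD, hgetj]
    have hdrop' : numbers.drop (j + 1) = tail' := by
      have h1 : (numbers.drop j).drop 1 = tail' := by rw [hdrop]; rfl
      rw [List.drop_drop] at h1
      exact h1
    rw [PySem.List.pyRange_one_cons (by exact_mod_cast hjlt)]
    simp only [List.foldl_cons]
    have hjne : j ≠ 0 := by omega
    by_cases hcond : y = PySem.List.pyGetD cur (-1) 0 + 1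
    · -- consecutive: A extends the open run; pvSplit absorbs y into the first run
      have hA : pvStepA numbers (done, cur) (j : Int)
          = (done, cur ++ [y]) := by
        simp [pvStepA, hyj, hinv, hcond]
      rw [hA]
      have hrec := ih (j + 1) done (cur ++ [y]) (by simp) hdrop' (by omega)
        (by push_cast
            rw [show (j : Int) + 1 - 1 = (j : Int) by ring, hyj,
                PySem.List.pyGetD_neg_one_append_singleton])
      push_cast at hrec ⊢
      rw [hrec]
      rw [PySem.List.pyGetD_neg_one_append_singleton]
      have hsplit : pvSplit (PySem.List.pyGetD cur (-1) 0) (y :: tail')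
          = (y :: (pvSplit y tail').1, (pvSplit y tail').2) := by
        simp [pvSplit, hcond]
      rw [hsplit]
      simp
    · -- break: A flushes; pvSplit stops the first run here
      have hA : pvStepA numbers (done, cur) (j : Int)
          = (pvFlushA done cur, [y]) := by
        simp [pvStepA, hjne, hyj, hinv, hcond]
      rw [hA, pvFlushA_eq_piece _ _ hcur]
      have hrec := ih (j + 1) (done ++ [pvPieceB cur]) [y] (by simp) hdrop' (by omega)
        (by push_cast
            rw [show (j : Int) + 1 - 1 = (j : Int) by ring, hyj,
                PySem.List.pyGetD_neg_one [y] 0 (by simp)]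
            simp)
      push_cast at hrec ⊢
      rw [hrec]
      have hsplit : pvSplit (PySem.List.pyGetD cur (-1) 0) (y :: tail')
          = ([], y :: tail') := by
        simp [pvSplit]
        intro h; exact absurd h hcond
      rw [hsplit]
      rw [PySem.List.pyGetD_neg_one [y] 0 (by simp)]
      simp [pvRuns]

theorem pvA_eq (numbers : List Int) :
    abbreviate_numbers numbers = PySem.Str.join ", " ((pvRuns numbers).map pvPieceB) := by
  match numbers with
  | [] =>
    simp [abbreviate_numbers, pvFlushA, pvRuns,
          PySem.List.pyRange_one_eq_nil, PySem.Str.join]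
  | x :: rest =>
    unfold abbreviate_numbers
    have hlen : (0 : Int) < ((x :: rest).length : Int) := by
      have : 0 < (x :: rest).length := Nat.succ_pos _
      exact_mod_cast this
    rw [PySem.List.pyRange_one_cons hlen]
    simp only [List.foldl_cons, zero_add]
    have hA0 : pvStepA (x :: rest) ([], []) 0 = ([], [x]) := by
      simp [pvStepA, PySem.List.pyGetD_zero_cons]
    rw [hA0]
    have key := pv_loop_eq (x :: rest) rest 1 [] [x] (by simp) (by simp) (le_refl 1)
      (by rw [show ((1 : Nat) : Int) - 1 = 0 by norm_num, PySem.List.pyGetD_zero_cons,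
              PySem.List.pyGetD_neg_one [x] 0 (by simp)]
          simp)
    rw [PySem.List.pyGetD_neg_one [x] 0 (by simp)] at key
    simp only [List.getLast_singleton, Nat.cast_one, List.nil_append] at key
    rw [key, pvRuns]
    simp

-- ---- B-side reduction ----

theorem pv_enum_getElem? {a : Type} (xs : List a) (s : Int) (j : Nat) :
    (PySem.List.enumerate xs s)[j]? = (xs[j]?).map (fun v => (s + j, v)) := by
  induction xs generalizing s j with
  | nil => simp [PySem.List.enumerate_nil]
  | cons x xs ih =>
    cases j with
    | zero => simp [PySem.List.enumerate_cons]
    | succ j =>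
      rw [PySem.List.enumerate_cons]
      simp only [List.getElem?_cons_succ, ih, List.getElem?_cons_succ]
      congr 1
      funext v
      simp
      ring

theorem pvKeys_getElem? (numbers : List Int) (j : Nat) :
    (pvKeys numbers)[j]? = (numbers[j]?).map (fun v => v - (j : Int)) := by
  simp only [pvKeys, List.getElem?_map, pv_enum_getElem?]
  cases numbers[j]? <;> simp

theorem pvPieces_nil : pvPieces [] = [] := by
  have h : pvStarts ([] : List Int) = [] := by
    simp [pvStarts, PySem.List.pyRange_one_eq_nil]
  simp [pvPieces, pvBounds, h]

theorem pvRuns_nil : pvRuns [] = [] := by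
  rw [pvRuns]

theorem pvBrk_zero (numbers : List Int) : pvBrk numbers 0 = true := by
  simp [pvBrk]

theorem pvBrk_pos (numbers : List Int) (j : Nat) (h1 : 1 ≤ j) (h2 : j < numbers.length) :
    pvBrk numbers (j : Int)
      = !(decide (numbers[j]'h2 = numbers[j-1]'(by omega) + 1)) := by
  have hj0 : ((j : Int) == 0) = false := by simp; omega
  have hji : (j : Int) - 1 = ((j - 1 : Nat) : Int) := by omega
  rw [pvBrk, hj0, hji, PySem.List.pyGet?_natCast, PySem.List.pyGet?_natCast,
      pvKeys_getElem?, pvKeys_getElem?,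
      List.getElem?_eq_getElem h2, List.getElem?_eq_getElem (show j - 1 < numbers.length by omega)]
  simp only [Option.map_some, Bool.false_or]
  by_cases he : numbers[j]'h2 = numbers[j-1]'(by omega) + 1
  · have h3 : numbers[j-1]'(by omega) + 1 - (j : Int) = numbers[j-1]'(by omega) - ((j - 1 : Nat) : Int) := by
      omega
    simp [he, h3]
  · have : numbers[j]'h2 - (j : Int) ≠ numbers[j-1]'(by omega) - ((j - 1 : Nat) : Int) := by
      intro hc; apply he; omega
    simp [this, he]

theorem pvStarts_nonneg (xs : List Int) : ∀ z ∈ pvBounds xs, 0 ≤ z := by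
  intro z hz
  rcases List.mem_append.mp hz with h | h
  · have := List.mem_filter.mp h
    have := (PySem.List.mem_pyRange_one.mp this.1).1
    exact this
  · simp at h
    omega

theorem pvStarts_decomp (pre rem : List Int) (x : Int)
    (hne : pre ≠ [])
    (hrun : ∀ (j : Nat) (h : j < pre.length), pre[j] = x + j)
    (hbrk : ∀ y, rem.head? = some y → y ≠ x + pre.length) :
    pvStarts (pre ++ rem) = 0 :: (pvStarts rem).map (· + (pre.length : Int)) := by
  have hpy : ∀ (m : Nat), PySem.List.pyRange 0 (m : Int) 1 = (List.range m).map (fun t : Nat => (t : Int)) := by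
    intro m
    rw [PySem.List.pyRange_one]
    simp
  have hk1 : 1 ≤ pre.length := List.length_pos_of_ne_nil hne
  have hlen : (pre ++ rem).length = pre.length + rem.length := List.length_append
  rw [pvStarts, hlen, hpy, List.range_add, List.map_append, List.map_map, List.filter_append]
  have part1 : ((List.range pre.length).map (fun t : Nat => (t : Int))).filter (pvBrk (pre ++ rem)) = [0] := by
    obtain ⟨m, hm⟩ : ∃ m, pre.length = m + 1 := ⟨pre.length - 1, by omega⟩
    rw [hm, List.range_succ_eq_map, List.map_cons, List.filter_cons, List.map_map]
    have h0 : pvBrk (pre ++ rem) ((0 : Nat) : Int) = true := by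
      simpa using pvBrk_zero (pre ++ rem)
    rw [if_pos (by simpa using h0)]
    have : ((List.range m).map ((fun t : Nat => (t : Int)) ∘ Nat.succ)).filter (pvBrk (pre ++ rem)) = [] := by
      rw [List.filter_eq_nil_iff]
      intro z hz
      rcases List.mem_map.mp hz with ⟨t, ht, rfl⟩
      have htm : t < m := List.mem_range.mp ht
      have hidx : t + 1 < (pre ++ rem).length := by
        rw [hlen]; omega
      have := pvBrk_pos (pre ++ rem) (t + 1) (by omega) hidx
      simp only [Function.comp_apply, Nat.succ_eq_add_one]
      rw [this]
      have e1 : (pre ++ rem)[t+1]'hidx = pre[t+1]'(by omega) := by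
        rw [List.getElem_append_left]
      have e2 : (pre ++ rem)[t+1-1]'(by omega) = pre[t]'(by omega) := by
        simp only [Nat.add_sub_cancel]
        rw [List.getElem_append_left]
      rw [e1, e2, hrun (t+1) (by omega), hrun t (by omega)]
      simp
      ring
    rw [this]
    norm_num
  have part2 : ((List.range rem.length).map ((fun t : Nat => (t : Int)) ∘ fun t => pre.length + t)).filter (pvBrk (pre ++ rem))
      = (pvStarts rem).map (· + (pre.length : Int)) := by
    rw [pvStarts, hpy, List.filter_map, List.filter_map, List.map_map]
    have hfil : (List.range rem.length).filter ((pvBrk (pre ++ rem)) ∘ (fun t : Nat => (t : Int)) ∘ (fun t => pre.length + t))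
        = (List.range rem.length).filter ((pvBrk rem) ∘ (fun t : Nat => (t : Int))) := by
      apply List.filter_congr
      intro t ht
      have htn : t < rem.length := List.mem_range.mp ht
      simp only [Function.comp_apply]
      cases t with
      | zero =>
        have hq2 : pvBrk rem ((0 : Nat) : Int) = true := by simpa using pvBrk_zero rem
        have hidx : pre.length + 0 < (pre ++ rem).length := by rw [hlen]; omega
        have hq1 := pvBrk_pos (pre ++ rem) (pre.length + 0) (by omega) hidx
        rw [hq1, hq2]
        have e1 : (pre ++ rem)[pre.length + 0]'hidx = rem[0]'(by omega) := by
          simp only [Nat.add_zero]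
          rw [List.getElem_append_right (by omega)]
          simp
        have e2 : (pre ++ rem)[pre.length + 0 - 1]'(by omega) = pre[pre.length - 1]'(by omega) := by
          simp only [Nat.add_zero]
          rw [List.getElem_append_left]
        have hy := hbrk (rem[0]'(by omega)) (by
          cases rem with
          | nil => simp at htn
          | cons a b => simp)
        rw [e1, e2, hrun (pre.length - 1) (by omega)]
        simp only [Bool.not_eq_eq_eq_not, Bool.not_true, decide_eq_false_iff_not]
        intro hc
        apply hy
        omega
      | succ t =>
        have hidx : pre.length + (t + 1) < (pre ++ rem).length := by rw [hlen]; omega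
        have hq1 := pvBrk_pos (pre ++ rem) (pre.length + (t + 1)) (by omega) hidx
        have hq2 := pvBrk_pos rem (t + 1) (by omega) (by omega)
        rw [hq1, hq2]
        have e1 : (pre ++ rem)[pre.length + (t + 1)]'hidx = rem[t+1]'(by omega) := by
          rw [List.getElem_append_right (by omega)]
          simp
        have e2 : (pre ++ rem)[pre.length + (t + 1) - 1]'(by omega) = rem[t]'(by omega) := by
          apply Option.some.inj
          rw [← List.getElem?_eq_getElem, ← List.getElem?_eq_getElem,
              show pre.length + (t + 1) - 1 = pre.length + t by omega,
              List.getElem?_append_right (by omega)]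
          simp
        rw [e1, e2]
        simp
    rw [hfil]
    apply List.map_congr_left
    intro t ht
    simp only [Function.comp_apply]
    push_cast
    ring
  rw [part1, part2]
  rfl

theorem pvStarts_nil : pvStarts ([] : List Int) = [] := by
  simp [pvStarts, PySem.List.pyRange_one_eq_nil]

theorem pvStarts_cons (y : Int) (t : List Int) :
    ∃ L, pvStarts (y :: t) = 0 :: L := by
  have h : PySem.List.pyRange 0 (((y :: t).length : Nat) : Int) 1
      = 0 :: PySem.List.pyRange 1 (((y :: t).length : Nat) : Int) 1 := by
    exact PySem.List.pyRange_one_cons (by exact_mod_cast Nat.succ_pos t.length)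
  rw [pvStarts, h, List.filter_cons, if_pos (by simpa using pvBrk_zero (y :: t))]
  exact ⟨_, rfl⟩

theorem pvPieceAt_prefix (pre rem : List Int) :
    pvPieceAt (pre ++ rem) (0, (pre.length : Int)) = pvPieceB pre := by
  have hs : PySem.List.slice (pre ++ rem) (some 0) (some (pre.length : Int)) = pre := by
    simp only [PySem.List.slice_zero_start, PySem.List.slice_to_natCast]
    exact List.take_left
  simp only [pvPieceAt, pvPieceB, hs, sub_zero]
  by_cases h : 1 < pre.length
  · rw [if_pos (by exact_mod_cast h), if_pos h]
  · rw [if_neg (by exact_mod_cast h), if_neg h]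

theorem pvPieceAt_shift (pre rem : List Int) (a b : Int) (ha : 0 ≤ a) (hb : 0 ≤ b) :
    pvPieceAt (pre ++ rem) (a + (pre.length : Int), b + (pre.length : Int)) = pvPieceAt rem (a, b) := by
  have hslice : PySem.List.slice (pre ++ rem) (some (a + (pre.length : Int))) (some (b + (pre.length : Int)))
      = PySem.List.slice rem (some a) (some b) := by
    rw [PySem.List.slice_toNat (ha := by omega) (hb := by omega), PySem.List.slice_toNat (ha := ha) (hb := hb)]
    have h1 : (a + (pre.length : Int)).toNat = pre.length + a.toNat := by omega
    have h2 : (b + (pre.length : Int)).toNat - (a + (pre.length : Int)).toNat = b.toNat - a.toNat := by omega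
    rw [h2, h1, List.drop_append]
    rw [List.drop_eq_nil_of_le (by omega), List.nil_append,
        show pre.length + a.toNat - pre.length = a.toNat by omega]
  have hba : b + (pre.length : Int) - (a + (pre.length : Int)) = b - a := by ring
  simp only [pvPieceAt, hslice, hba]

theorem pvPieces_map (l : List Int) :
    pvPieces l = ((pvBounds l).zip ((pvBounds l).drop 1)).map (pvPieceAt l) := by
  rw [pvPieces, PySem.List.foldl_append_singleton_eq_map]
  simp

theorem pvPieces_decomp (pre rem : List Int) (x : Int)
    (hne : pre ≠ [])
    (hrun : ∀ (j : Nat) (h : j < pre.length), pre[j] = x + j)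
    (hbrk : ∀ y, rem.head? = some y → y ≠ x + pre.length) :
    pvPieces (pre ++ rem) = pvPieceB pre :: pvPieces rem := by
  have hb : pvBounds (pre ++ rem) = 0 :: (pvBounds rem).map (· + (pre.length : Int)) := by
    rw [pvBounds, pvStarts_decomp pre rem x hne hrun hbrk, pvBounds, List.map_append]
    simp only [List.length_append, List.cons_append, List.map_cons, List.map_nil]
    push_cast
    ring_nf
  cases rem with
  | nil =>
    have hb0 : pvBounds ([] : List Int) = [0] := by
      rw [pvBounds, pvStarts_nil]
      rfl
    rw [pvPieces_map, hb, hb0, pvPieces_nil]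
    simp only [List.map_cons, List.map_nil, zero_add]
    simp only [List.drop_succ_cons, List.drop_zero, List.zip_cons_cons, List.zip_nil_right,
      List.map_cons, List.map_nil]
    rw [pvPieceAt_prefix pre []]
  | cons y tl =>
    obtain ⟨L, hL⟩ := pvStarts_cons y tl
    have hbr : pvBounds (y :: tl) = 0 :: (L ++ [((y :: tl).length : Int)]) := by
      rw [pvBounds, hL]
      rfl
    rw [pvPieces_map, pvPieces_map, hb, hbr]
    simp only [List.map_cons, zero_add, List.drop_succ_cons, List.drop_zero,
      List.zip_cons_cons, List.map_cons]
    congr 1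
    · exact pvPieceAt_prefix pre (y :: tl)
    · rw [show ((pre.length : Int) :: (L ++ [((y :: tl).length : Int)]).map (· + (pre.length : Int)))
            = ((0 : Int) :: (L ++ [((y :: tl).length : Int)])).map (· + (pre.length : Int)) by
          simp]
      rw [List.zip_map, List.map_map]
      apply List.map_congr_left
      intro p hp
      rcases p with ⟨pa, pb⟩
      have hmem := List.of_mem_zip hp
      have hpa : 0 ≤ pa := pvStarts_nonneg (y :: tl) pa (by rw [hbr]; exact hmem.1)
      have hpb : 0 ≤ pb := pvStarts_nonneg (y :: tl) pb (by
        rw [hbr]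
        exact List.mem_cons_of_mem _ hmem.2)
      simpa using pvPieceAt_shift pre (y :: tl) pa pb hpa hpb

theorem pvSplit_append (p : Int) (ys : List Int) :
    (pvSplit p ys).1 ++ (pvSplit p ys).2 = ys := by
  induction ys generalizing p with
  | nil => simp [pvSplit]
  | cons y ys ih =>
    simp only [pvSplit]
    split
    · simpa using ih y
    · simp

theorem pvSplit_fst_getElem (p : Int) (ys : List Int) :
    ∀ (j : Nat) (h : j < (pvSplit p ys).1.length), (pvSplit p ys).1[j] = p + 1 + j := by
  induction ys generalizing p with
  | nil => simp [pvSplit]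
  | cons y ys ih =>
    intro j hj
    by_cases hc : y = p + 1
    · simp only [pvSplit, if_pos hc] at hj ⊢
      cases j with
      | zero => simpa using hc
      | succ j =>
        simp only [List.getElem_cons_succ]
        rw [ih y j (by simpa using hj), hc]
        push_cast
        ring
    · simp [pvSplit, hc] at hj

theorem pvSplit_snd_head (p : Int) (ys : List Int) (y : Int)
    (h : (pvSplit p ys).2.head? = some y) : y ≠ p + (pvSplit p ys).1.length + 1 := by
  induction ys generalizing p with
  | nil => simp [pvSplit] at h
  | cons z ys ih =>
    by_cases hc : z = p + 1
    · simp only [pvSplit, if_pos hc] at h ⊢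
      have := ih z (by simpa using h)
      simp only [List.length_cons]
      push_cast
      rw [hc] at this ⊢
      intro he
      exact this (by omega)
    · simp only [pvSplit, if_neg hc] at h ⊢
      simp at h
      subst h
      simpa using hc

theorem pvB_eq (numbers : List Int) :
    pvPieces numbers = (pvRuns numbers).map pvPieceB := by
  have H : ∀ (N : Nat) (l : List Int), l.length ≤ N →
      pvPieces l = (pvRuns l).map pvPieceB := by
    intro N
    induction N with
    | zero =>
      intro l hl
      have : l = [] := List.length_eq_zero_iff.mp (Nat.le_zero.mp hl)
      subst this
      rw [pvPieces_nil, pvRuns_nil]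
      rfl
    | succ N ih =>
      intro l hl
      match l with
      | [] => rw [pvPieces_nil, pvRuns_nil]; rfl
      | x :: ys =>
        have hx : x :: ys = (x :: (pvSplit x ys).1) ++ (pvSplit x ys).2 := by
          simpa using (pvSplit_append x ys).symm
        have hrun : ∀ (j : Nat) (h : j < (x :: (pvSplit x ys).1).length),
            (x :: (pvSplit x ys).1)[j] = x + j := by
          intro j h
          cases j with
          | zero => simp
          | succ j =>
            simp only [List.getElem_cons_succ]
            rw [pvSplit_fst_getElem x ys j (by simpa using h)]
            push_cast
            ring
        have hbrk : ∀ y, (pvSplit x ys).2.head? = some y →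
            y ≠ x + (x :: (pvSplit x ys).1).length := by
          intro y hy
          have := pvSplit_snd_head x ys y hy
          simpa [List.length_cons] using fun he => this (by omega)
        calc pvPieces (x :: ys)
            = pvPieces ((x :: (pvSplit x ys).1) ++ (pvSplit x ys).2) := by rw [← hx]
          _ = pvPieceB (x :: (pvSplit x ys).1) :: pvPieces (pvSplit x ys).2 :=
              pvPieces_decomp _ _ x (by simp) hrun hbrk
          _ = (pvRuns (x :: ys)).map pvPieceB := by
              rw [pvRuns, List.map_cons]
              congr 1
              refine ih _ ?_
              have h1 := pvSplit_snd_length x ys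
              simp only [List.length_cons] at hl
              omega
  exact H numbers.length numbers (le_refl _)

-- ===== VERDICT (by name: the statement is the Claim_ definition above) =====
theorem abbreviate_numbers_spec : Claim_equal_abbreviate_numbers := by
  intro numbers _
  unfold Spec_abbreviate_numbers abbreviate_numbers_alt
  rw [pvA_eq, pvB_eq]
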